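-- pv_equiv track=rewrite | github.com/umer-tahir1/Graph_Recommendation_System | Backend/app/recommender.py | bfs_related_products
-- ===== SOURCE A (Python) =====
-- from collections import defaultdict, deque
-- from typing import Dict, Set, List, Tuple
--
-- def bfs_related_products(start_prod: int, product_graph: Dict[int, Set[int]], max_depth: int = 2) -> List[int]:
--     visited = set([start_prod])
--     q = deque([(start_prod, 0)])
--     related = []
--     while q:
--         node, depth = q.popleft()
--         if depth >= 1:
--             related.append(node)
--         if depth >= max_depth:
--             continue
--         for nb in product_graph.get(node, set()):
--             if nb not in visited:
--                 visited.add(nb)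
--                 q.append((nb, depth + 1))
--     return related
-- ===== SOURCE B (Python) =====
-- def bfs_related_products(start_prod, product_graph, max_depth=2):
--     # Level-synchronized BFS: expand whole frontiers instead of a depth-tagged queue.
--     visited = {start_prod}
--     frontier = [start_prod]
--     result = []
--     depth = 0
--     while frontier and depth < max_depth:
--         depth += 1
--         next_frontier = []
--         for node in frontier:
--             for nb in product_graph.get(node, set()):
--                 if nb not in visited:
--                     visited.add(nb)
--                     result.append(nb)
--                     next_frontier.append(nb)
--         frontier = next_frontier
--     return result
-- ===== Notes on version B (the rewrite author's own statement) =====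
-- stated objective: alternative
-- what changed: Replaced the depth-tagged deque BFS with a level-synchronized BFS that expands whole frontiers level by level, collecting newly visited nodes directly instead of tagging and re-checking depths on dequeue.
import Mathlib
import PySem

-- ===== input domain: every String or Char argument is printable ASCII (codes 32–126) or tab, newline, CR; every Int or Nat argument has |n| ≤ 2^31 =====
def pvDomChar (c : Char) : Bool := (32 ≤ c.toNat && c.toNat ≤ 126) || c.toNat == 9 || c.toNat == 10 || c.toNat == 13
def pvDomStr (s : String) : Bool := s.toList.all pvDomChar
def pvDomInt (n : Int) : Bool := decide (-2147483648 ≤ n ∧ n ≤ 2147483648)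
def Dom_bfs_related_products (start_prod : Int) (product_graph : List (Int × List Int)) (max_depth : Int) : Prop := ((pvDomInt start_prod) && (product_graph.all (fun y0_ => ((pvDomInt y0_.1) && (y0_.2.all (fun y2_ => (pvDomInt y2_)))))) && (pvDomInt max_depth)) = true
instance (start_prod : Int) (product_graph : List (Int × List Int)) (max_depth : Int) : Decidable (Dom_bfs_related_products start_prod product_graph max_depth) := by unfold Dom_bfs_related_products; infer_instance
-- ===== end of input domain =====

-- B replaces A's depth-tagged deque BFS by a level-synchronized frontier BFS (alternative decomposition, same cost).

-- ===== PORT A =====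
-- product_graph.get(node, set()) : first-match lookup in the association list, default empty
def pvAdj (g : List (Int × List Int)) (node : Int) : List Int :=
  PySem.Dict.getD (PySem.Dict.mk g) node []

-- body of A's inner 'for nb in …' loop: state = (visited, queue), tag d = depth + 1
def pvStepA (d : Int) (s : PySem.Set Int × List (Int × Int)) (nb : Int) :
    PySem.Set Int × List (Int × Int) :=
  if PySem.Set.contains s.1 nb then s
  else (PySem.Set.add s.1 nb, s.2 ++ [(nb, d)])

-- termination measure helper for A's while loop: graph nodes not yet visited
def pvUnseen (g : List (Int × List Int)) (v : PySem.Set Int) : Nat :=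
  ((g.flatMap Prod.snd).filter (fun x => !(PySem.Set.contains v x))).length

theorem pvAdj_sub (g : List (Int × List Int)) (node : Int) {x : Int}
    (hx : x ∈ pvAdj g node) : x ∈ g.flatMap Prod.snd := by
  induction g with
  | nil => simp [pvAdj, PySem.Dict.getD, PySem.Dict.get?] at hx
  | cons p t ih =>
    simp only [pvAdj, PySem.Dict.getD_eq_get?_getD] at hx ih
    rw [show (p :: t : List (Int × List Int)) = (p.1, p.2) :: t from by simp,
      PySem.Dict.get?_mk_cons] at hx
    by_cases h : p.1 == node
    · simp [h] at hx
      simp [List.mem_flatMap]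
      exact Or.inl hx
    · simp [h] at hx
      simp [List.mem_flatMap]
      rcases List.mem_flatMap.mp (ih hx) with ⟨q, hq, hxq⟩
      exact Or.inr ⟨q.1, q.2, by simpa using hq, hxq⟩

theorem pv_filter_mono {l : List Int} {p q : Int → Bool} (h : ∀ x, q x = true → p x = true) :
    (l.filter q).length ≤ (l.filter p).length := by
  induction l with
  | nil => simp
  | cons b t ih =>
    by_cases hq : q b = true
    · simp [List.filter, hq, h b hq]; omega
    · simp [List.filter, hq]
      by_cases hp : p b = true
      · simp [hp]; omega
      · simp [hp]; exact ih

theorem pv_filter_lt {l : List Int} {p q : Int → Bool} (h : ∀ x, q x = true → p x = true)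
    {a : Int} (ha : a ∈ l) (hp : p a = true) (hq : q a = false) :
    (l.filter q).length < (l.filter p).length := by
  induction l with
  | nil => cases ha
  | cons b t ih =>
    rcases List.mem_cons.mp ha with rfl | hat
    · simp [List.filter, hp, hq]
      have := pv_filter_mono (l := t) h
      omega
    · by_cases hqb : q b = true
      · simp [List.filter, hqb, h b hqb]; exact ih hat
      · simp [List.filter, hqb]
        by_cases hpb : p b = true
        · simp [hpb]; have := ih hat; omega
        · simp [hpb]; exact ih hat

theorem pv_stepA_measure (g : List (Int × List Int)) (d : Int) :
    ∀ (nbrs : List Int) (v : PySem.Set Int) (q : List (Int × Int)),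
      (∀ x ∈ nbrs, x ∈ g.flatMap Prod.snd) →
      (nbrs.foldl (pvStepA d) (v, q)).2.length + pvUnseen g (nbrs.foldl (pvStepA d) (v, q)).1 ≤
      q.length + pvUnseen g v := by
  intro nbrs
  induction nbrs with
  | nil => intro v q _; simp
  | cons nb t ih =>
    intro v q hsub
    rw [List.foldl_cons]
    by_cases hc : PySem.Set.contains v nb = true
    · rw [show pvStepA d (v, q) nb = (v, q) from by rw [pvStepA, if_pos hc]]
      exact ih v q (fun x hx => hsub x (List.mem_cons_of_mem _ hx))
    · rw [show pvStepA d (v, q) nb = (PySem.Set.add v nb, q ++ [(nb, d)]) from by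
        rw [pvStepA, if_neg hc]]
      have hnb : nb ∉ v := by
        intro hm
        exact hc (by simp [hm])
      have hlt : pvUnseen g (PySem.Set.add v nb) < pvUnseen g v := by
        unfold pvUnseen
        apply pv_filter_lt (a := nb)
        · intro x hx
          simp only [Bool.not_eq_true'] at hx ⊢
          rw [PySem.Set.add_of_not_mem hnb] at hx
          simp at hx ⊢
          tauto
        · exact hsub nb (List.mem_cons_self ..)
        · simp only [Bool.not_eq_true']
          simpa using hnb
        · rw [PySem.Set.add_of_not_mem hnb]
          simp
      have hih := ih (PySem.Set.add v nb) (q ++ [(nb, d)])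
        (fun x hx => hsub x (List.mem_cons_of_mem _ hx))
      simp only [List.length_append, List.length_cons, List.length_nil] at hih
      omega

-- literal transliteration of A's while-loop over the deque of (node, depth) pairs
def pvLoopA (g : List (Int × List Int)) (maxd : Int) (v : PySem.Set Int)
    (q : List (Int × Int)) (rel : List Int) : List Int :=
  match q with
  | [] => rel
  | (node, depth) :: qt =>
    let rel' := if 1 ≤ depth then rel ++ [node] else rel
    if maxd ≤ depth then pvLoopA g maxd v qt rel'
    else
      let st := (pvAdj g node).foldl (pvStepA (depth + 1)) (v, qt)
      pvLoopA g maxd st.1 st.2 rel'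
termination_by q.length + pvUnseen g v
decreasing_by
  · simp only [List.length_cons]; omega
  · have := pv_stepA_measure g (depth + 1) (pvAdj g node) v qt
      (fun x hx => pvAdj_sub g node hx)
    simp only [List.length_cons]
    omega

def bfs_related_products (start_prod : Int) (product_graph : List (Int × List Int)) (max_depth : Int) : List Int :=
  pvLoopA product_graph max_depth (PySem.Set.ofList [start_prod]) [(start_prod, 0)] []

-- ===== PORT B =====
-- body of B's inner 'for nb in …' loop: state = (visited, result, next_frontier)
def pvStepNb (s : PySem.Set Int × List Int × List Int) (nb : Int) :
    PySem.Set Int × List Int × List Int :=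
  if PySem.Set.contains s.1 nb then s
  else (PySem.Set.add s.1 nb, s.2.1 ++ [nb], s.2.2 ++ [nb])

-- B's while loop; fuel = number of levels still allowed (max_depth - depth)
def pvLoopB (g : List (Int × List Int)) (v : PySem.Set Int)
    (frontier res : List Int) : Nat → List Int
  | 0 => res
  | n + 1 =>
    if frontier = [] then res
    else
      let st := frontier.foldl (fun s node => (pvAdj g node).foldl pvStepNb s) (v, res, ([] : List Int))
      pvLoopB g st.1 st.2.2 st.2.1 n

def bfs_related_products_alt (start_prod : Int) (product_graph : List (Int × List Int)) (max_depth : Int) : List Int :=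
  pvLoopB product_graph (PySem.Set.ofList [start_prod]) [start_prod] [] max_depth.toNat

-- ===== PRECONDITION & SPEC =====
def Spec_bfs_related_products (start_prod : Int) (product_graph : List (Int × List Int)) (max_depth : Int) (out : List Int) : Prop := out = bfs_related_products_alt start_prod product_graph max_depth
instance (start_prod : Int) (product_graph : List (Int × List Int)) (max_depth : Int) (out : List Int) : Decidable (Spec_bfs_related_products start_prod product_graph max_depth out) := by unfold Spec_bfs_related_products; infer_instance

-- ===== CLAIM (what is proved, stated in full; the proofs are below) =====
def Claim_equal_bfs_related_products : Prop := ∀ (start_prod : Int) (product_graph : List (Int × List Int)) (max_depth : Int), Dom_bfs_related_products start_prod product_graph max_depth → Spec_bfs_related_products start_prod product_graph max_depth (bfs_related_products start_prod product_graph max_depth)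

-- ===== LEMMAS AND PROOFS =====

-- canonical "collect the fresh neighbours" recursions (proof-side only)
def pvInner (v : PySem.Set Int) : List Int → PySem.Set Int × List Int
  | [] => (v, [])
  | nb :: t =>
    if PySem.Set.contains v nb then pvInner v t
    else
      let p := pvInner (PySem.Set.add v nb) t
      (p.1, nb :: p.2)

def pvExpand (g : List (Int × List Int)) (v : PySem.Set Int) : List Int → PySem.Set Int × List Int
  | [] => (v, [])
  | node :: rest =>
    let p := pvInner v (pvAdj g node)
    let e := pvExpand g p.1 rest
    (e.1, p.2 ++ e.2)

def pvLevels (g : List (Int × List Int)) (v : PySem.Set Int) (frontier : List Int) : Nat → List Int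
  | 0 => []
  | n + 1 =>
    if frontier = [] then []
    else
      let e := pvExpand g v frontier
      e.2 ++ pvLevels g e.1 e.2 n

theorem pv_foldA_eq_inner (d : Int) :
    ∀ (nbrs : List Int) (v : PySem.Set Int) (q : List (Int × Int)),
      nbrs.foldl (pvStepA d) (v, q) =
      ((pvInner v nbrs).1, q ++ (pvInner v nbrs).2.map (fun x => (x, d))) := by
  intro nbrs
  induction nbrs with
  | nil => intro v q; simp [pvInner]
  | cons nb t ih =>
    intro v q
    rw [List.foldl_cons]
    by_cases hc : PySem.Set.contains v nb = true
    · rw [show pvStepA d (v, q) nb = (v, q) from by rw [pvStepA, if_pos hc]]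
      rw [ih v q]
      simp only [pvInner]
      rw [if_pos hc]
    · rw [show pvStepA d (v, q) nb = (PySem.Set.add v nb, q ++ [(nb, d)]) from by
        rw [pvStepA, if_neg hc]]
      rw [ih (PySem.Set.add v nb) (q ++ [(nb, d)])]
      simp only [pvInner]
      rw [if_neg hc]
      simp

theorem pv_foldB_eq_inner :
    ∀ (nbrs : List Int) (v : PySem.Set Int) (res nxt : List Int),
      nbrs.foldl pvStepNb (v, res, nxt) =
      ((pvInner v nbrs).1, res ++ (pvInner v nbrs).2, nxt ++ (pvInner v nbrs).2) := by
  intro nbrs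
  induction nbrs with
  | nil => intro v res nxt; simp [pvInner]
  | cons nb t ih =>
    intro v res nxt
    rw [List.foldl_cons]
    by_cases hc : PySem.Set.contains v nb = true
    · rw [show pvStepNb (v, res, nxt) nb = (v, res, nxt) from by rw [pvStepNb, if_pos hc]]
      rw [ih v res nxt]
      simp only [pvInner]
      rw [if_pos hc]
    · rw [show pvStepNb (v, res, nxt) nb =
          (PySem.Set.add v nb, res ++ [nb], nxt ++ [nb]) from by rw [pvStepNb, if_neg hc]]
      rw [ih (PySem.Set.add v nb) (res ++ [nb]) (nxt ++ [nb])]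
      simp only [pvInner]
      rw [if_neg hc]
      simp

theorem pv_foldB_outer (g : List (Int × List Int)) :
    ∀ (frontier : List Int) (v : PySem.Set Int) (res nxt : List Int),
      frontier.foldl (fun s node => (pvAdj g node).foldl pvStepNb s) (v, res, nxt) =
      ((pvExpand g v frontier).1, res ++ (pvExpand g v frontier).2,
        nxt ++ (pvExpand g v frontier).2) := by
  intro frontier
  induction frontier with
  | nil => intro v res nxt; simp [pvExpand]
  | cons node rest ih =>
    intro v res nxt
    simp only [List.foldl_cons]
    rw [pv_foldB_eq_inner (pvAdj g node) v res nxt]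
    rw [ih (pvInner v (pvAdj g node)).1 (res ++ (pvInner v (pvAdj g node)).2)
      (nxt ++ (pvInner v (pvAdj g node)).2)]
    simp only [pvExpand]
    simp [List.append_assoc]

theorem pv_loopB_eq_levels (g : List (Int × List Int)) :
    ∀ (n : Nat) (v : PySem.Set Int) (frontier res : List Int),
      pvLoopB g v frontier res n = res ++ pvLevels g v frontier n := by
  intro n
  induction n with
  | zero => intro v frontier res; simp [pvLoopB, pvLevels]
  | succ n ih =>
    intro v frontier res
    by_cases hf : frontier = []
    · simp [pvLoopB, pvLevels, hf]
    · simp only [pvLoopB, pvLevels, hf, if_false]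
      rw [pv_foldB_outer g frontier v res []]
      simp [ih, List.append_assoc]

theorem pv_loopA_high (g : List (Int × List Int)) (maxd : Int) :
    ∀ (l : List Int) (v : PySem.Set Int) (rel : List Int) (d : Int),
      1 ≤ d → maxd ≤ d →
      pvLoopA g maxd v (l.map (fun x => (x, d))) rel = rel ++ l := by
  intro l
  induction l with
  | nil => intro v rel d _ _; simp [pvLoopA]
  | cons x xs ih =>
    intro v rel d h1 h2
    rw [List.map_cons, pvLoopA]
    simp only [h1, if_true, h2, if_true]
    rw [ih v (rel ++ [x]) d h1 h2]
    simp

theorem pv_loopA_mid (g : List (Int × List Int)) (maxd : Int) :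
    ∀ (l1 : List Int) (v : PySem.Set Int) (rel l2 : List Int) (d : Int),
      1 ≤ d → ¬ maxd ≤ d →
      pvLoopA g maxd v (l1.map (fun x => (x, d)) ++ l2.map (fun x => (x, d + 1))) rel =
      pvLoopA g maxd (pvExpand g v l1).1
        ((l2 ++ (pvExpand g v l1).2).map (fun x => (x, d + 1))) (rel ++ l1) := by
  intro l1
  induction l1 with
  | nil => intro v rel l2 d _ _; simp [pvExpand]
  | cons node xs ih =>
    intro v rel l2 d h1 h2
    rw [List.map_cons, List.cons_append, pvLoopA]
    simp only [h1, if_true, h2, if_false]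
    rw [pv_foldA_eq_inner (d + 1) (pvAdj g node) v]
    have harr : (xs.map (fun x => (x, d)) ++ l2.map (fun x => (x, d + 1))) ++
        (pvInner v (pvAdj g node)).2.map (fun x => (x, d + 1)) =
        xs.map (fun x => (x, d)) ++ (l2 ++ (pvInner v (pvAdj g node)).2).map (fun x => (x, d + 1)) := by
      simp [List.append_assoc]
    rw [harr, ih (pvInner v (pvAdj g node)).1 (rel ++ [node]) (l2 ++ (pvInner v (pvAdj g node)).2) d h1 h2]
    simp [pvExpand, List.append_assoc]

theorem pv_loopA_eq_levels (g : List (Int × List Int)) (maxd : Int) :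
    ∀ (n : Nat) (v : PySem.Set Int) (frontier rel : List Int) (d : Int),
      1 ≤ d → (maxd - d).toNat = n →
      pvLoopA g maxd v (frontier.map (fun x => (x, d))) rel =
      rel ++ frontier ++ pvLevels g v frontier n := by
  intro n
  induction n with
  | zero =>
    intro v frontier rel d h1 hn
    have h2 : maxd ≤ d := by omega
    rw [pv_loopA_high g maxd frontier v rel d h1 h2]
    simp [pvLevels]
  | succ n ih =>
    intro v frontier rel d h1 hn
    have h2 : ¬ maxd ≤ d := by omega
    by_cases hf : frontier = []
    · subst hf; simp [pvLoopA, pvLevels]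
    · have hmid := pv_loopA_mid g maxd frontier v rel [] d h1 h2
      simp only [List.map_nil, List.nil_append, List.append_nil] at hmid
      rw [hmid]
      rw [ih (pvExpand g v frontier).1 (pvExpand g v frontier).2 (rel ++ frontier) (d + 1)
        (by omega) (by omega)]
      simp [pvLevels, hf, List.append_assoc]

-- ===== VERDICT (by name: the statement is the Claim_ definition above) =====
theorem bfs_related_products_spec : Claim_equal_bfs_related_products := by
  intro start_prod g maxd _
  unfold Spec_bfs_related_products bfs_related_products bfs_related_products_alt
  rw [pv_loopB_eq_levels, pvLoopA]
  simp only [show ¬ ((1 : Int) ≤ 0) from by omega, if_false]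
  by_cases h0 : maxd ≤ 0
  · simp only [h0, if_true]
    rw [pvLoopA]
    have : maxd.toNat = 0 := by omega
    simp [this, pvLevels]
  · simp only [h0, if_false]
    rw [pv_foldA_eq_inner (0 + 1) (pvAdj g start_prod)]
    simp only [List.nil_append]
    rw [pv_loopA_eq_levels g maxd ((maxd - 1).toNat) _ _ _ (0 + 1) (by omega) (by omega)]
    have hm : maxd.toNat = (maxd - 1).toNat + 1 := by omega
    rw [hm]
    simp [pvLevels, pvExpand]
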